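-- pv_equiv track=rewrite | github.com/drgzkr/StateSpaceTrajectories | neuro_tools/utils.py | find_label_boundaries
-- ===== SOURCE A (Python) =====
-- def find_label_boundaries(labels):
--     """
--     Identify segment boundaries in a 1-D label sequence.
--
--     Parameters
--     ----------
--     labels : array-like
--
--     Returns
--     -------
--     boundaries : list of int
--         Indices where a new label begins (including 0 and len(labels)).
--     region_sizes : list of int
--     unique_labels : list
--     """
--     labels = list(labels)
--     boundaries = [0]
--     region_sizes = []
--     unique_labels = []
--
--     current = labels[0]
--     start = 0
--
--     for i, lbl in enumerate(labels[1:], start=1):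
--         if lbl != current:
--             boundaries.append(i)
--             region_sizes.append(i - start)
--             unique_labels.append(current)
--             current = lbl
--             start = i
--
--     boundaries.append(len(labels))
--     region_sizes.append(len(labels) - start)
--     unique_labels.append(current)
--
--     return boundaries, region_sizes, unique_labels
-- ===== SOURCE B (Python) =====
-- def find_label_boundaries(labels):
--     """Run-length reimplementation: a two-pointer scan extracts maximal runs as
--     (value, length) pairs (comparing against the run's head, not the previous
--     element); boundaries are then the cumulative run starts."""
--     labels = list(labels)
--     n = len(labels)
--     runs = []
--     i = 0
--     while i < n:
--         j = i + 1
--         while j < n and labels[j] == labels[i]: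
--             j += 1
--         runs.append((labels[i], j - i))
--         i = j
--     boundaries = [0]
--     for _, length in runs:
--         boundaries.append(boundaries[-1] + length)
--     region_sizes = [length for _, length in runs]
--     unique_labels = [value for value, _ in runs]
--     return boundaries, region_sizes, unique_labels
-- ===== Notes on version B (the rewrite author's own statement) =====
-- stated objective: alternative
-- what changed: B extracts maximal runs as (value,length) pairs with a nested two-pointer scan that compares each element to the run's head (A compares each element to a tracked 'current' and maintains start/current accumulators, growing all three output lists inline); B then derives boundaries as cumulative sums of run lengths and the other two outputs as projections of the run list.
import Mathlib
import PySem

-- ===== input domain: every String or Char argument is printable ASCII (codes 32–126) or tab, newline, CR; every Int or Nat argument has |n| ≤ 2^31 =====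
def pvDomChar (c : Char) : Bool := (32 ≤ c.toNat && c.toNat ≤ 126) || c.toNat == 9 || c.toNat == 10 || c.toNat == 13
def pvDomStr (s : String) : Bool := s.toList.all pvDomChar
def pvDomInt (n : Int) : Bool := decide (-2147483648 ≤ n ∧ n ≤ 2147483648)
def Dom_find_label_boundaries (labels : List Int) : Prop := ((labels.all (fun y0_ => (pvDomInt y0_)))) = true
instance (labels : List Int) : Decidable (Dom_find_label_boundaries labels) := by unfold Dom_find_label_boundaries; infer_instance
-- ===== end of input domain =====

-- B extracts (value,length) runs with a two-pointer scan and derives boundaries as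
-- cumulative run lengths, instead of A's inline current/start accumulator scan
-- (objective: alternative decomposition). Pre_ excludes only the empty list, on which A raises.


-- ===== PORT A =====
-- labels[0] raises on empty input → excluded by Pre_; pyGetD is exact for index 0 on nonempty lists.
def find_label_boundaries (labels : List Int) : List Int × List Int × List Int :=
  let current : Int := PySem.List.pyGetD labels 0 0
  let st := (PySem.List.enumerate (PySem.List.slice labels (some 1) none) 1).foldl
    (fun (s : List Int × List Int × List Int × Int × Int) (p : Int × Int) =>
      if p.2 ≠ s.2.2.2.1 then
        (s.1 ++ [p.1], s.2.1 ++ [p.1 - s.2.2.2.2], s.2.2.1 ++ [s.2.2.2.1], p.2, p.1)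
      else s)
    ([0], [], [], current, 0)
  (st.1 ++ [(labels.length : Int)],
   st.2.1 ++ [(labels.length : Int) - st.2.2.2.2],
   st.2.2.1 ++ [st.2.2.2.1])

-- ===== PORT B =====
-- inner `while j < n and labels[j] == labels[i]` loop (indices stay in range, so getD is exact)
def pvAdvance (labels : List Int) (v : Int) (j : Nat) : Nat :=
  if h : j < labels.length ∧ labels.getD j 0 = v then pvAdvance labels v (j + 1) else j
termination_by labels.length - j
decreasing_by omega

theorem pvAdvance_ge (labels : List Int) (v : Int) (j : Nat) : j ≤ pvAdvance labels v j := by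
  fun_induction pvAdvance with
  | case1 j h ih => omega
  | case2 j h => exact le_refl j

-- outer `while i < n` loop collecting (value, length) runs
def pvRuns (labels : List Int) (i : Nat) : List (Int × Int) :=
  if h : i < labels.length then
    let j := pvAdvance labels (labels.getD i 0) (i + 1)
    (labels.getD i 0, (j : Int) - (i : Int)) :: pvRuns labels j
  else []
termination_by labels.length - i
decreasing_by
  have := pvAdvance_ge labels (labels.getD i 0) (i + 1)
  omega

def find_label_boundaries_alt (labels : List Int) : List Int × List Int × List Int :=
  let runs := pvRuns labels 0
  -- boundaries[-1] on the always-nonempty accumulator → getLastD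
  let boundaries := runs.foldl (fun b p => b ++ [b.getLastD 0 + p.2]) [0]
  let region_sizes := runs.map (fun p => p.2)
  let unique_labels := runs.map (fun p => p.1)
  (boundaries, region_sizes, unique_labels)

-- ===== PRECONDITION & SPEC =====
-- Pre_ excludes only the empty list, on which Python A raises IndexError.
def Pre_find_label_boundaries (labels : List Int) : Prop := labels ≠ []
instance (labels : List Int) : Decidable (Pre_find_label_boundaries labels) := by
  unfold Pre_find_label_boundaries; infer_instance
def pvWitness_find_label_boundaries : List Int := ([1, 1, 2])

def Spec_find_label_boundaries (labels : List Int) (out : List Int × List Int × List Int) : Prop := out = find_label_boundaries_alt labels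
instance (labels : List Int) (out : List Int × List Int × List Int) : Decidable (Spec_find_label_boundaries labels out) := by unfold Spec_find_label_boundaries; infer_instance

-- ===== CLAIM (what is proved, stated in full; the proofs are below) =====
def Claim_equal_find_label_boundaries : Prop := ∀ (labels : List Int), Dom_find_label_boundaries labels → Pre_find_label_boundaries labels → Spec_find_label_boundaries labels (find_label_boundaries labels)

-- ===== LEMMAS AND PROOFS =====

-- Proof-side mirror of A's scan: given current label c, start s and next index i,
-- returns (change indices, region sizes emitted, currents emitted, final current, final start).
def stepA (c s i : Int) : List Int → List Int × List Int × List Int × Int × Int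
  | [] => ([], [], [], c, s)
  | x :: xs =>
    if x ≠ c then
      let r := stepA x i (i + 1) xs
      (i :: r.1, (i - s) :: r.2.1, c :: r.2.2.1, r.2.2.2)
    else stepA c s (i + 1) xs

theorem foldA_eq (rest : List Int) : ∀ (c s i : Int) (bnd rs ul : List Int),
    (PySem.List.enumerate rest i).foldl
      (fun (st : List Int × List Int × List Int × Int × Int) (p : Int × Int) =>
        if p.2 ≠ st.2.2.2.1 then
          (st.1 ++ [p.1], st.2.1 ++ [p.1 - st.2.2.2.2], st.2.2.1 ++ [st.2.2.2.1], p.2, p.1)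
        else st)
      (bnd, rs, ul, c, s)
    = (bnd ++ (stepA c s i rest).1, rs ++ (stepA c s i rest).2.1,
       ul ++ (stepA c s i rest).2.2.1, (stepA c s i rest).2.2.2) := by
  induction rest with
  | nil => intro c s i bnd rs ul; simp [PySem.List.enumerate_nil, stepA]
  | cons x xs ih =>
    intro c s i bnd rs ul
    rw [PySem.List.enumerate_cons]
    by_cases h : x = c
    · subst h
      have hf : ¬ (x ≠ x) := fun hh => hh rfl
      simp only [List.foldl_cons, if_neg hf, stepA]
      exact ih x s (i + 1) bnd rs ul
    · have ht : x ≠ c := h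
      simp only [List.foldl_cons, if_pos ht, stepA]
      rw [ih x i (i + 1) (bnd ++ [i]) (rs ++ [i - s]) (ul ++ [c])]
      simp

-- run list of the remaining elements, given a run of value c with m elements already consumed
def runsAcc (c m : Int) : List Int → List (Int × Int)
  | [] => [(c, m)]
  | x :: xs => if x = c then runsAcc c (m + 1) xs else (c, m) :: runsAcc x 1 xs

-- cumulative boundary positions of a run list, starting from t
def cums (t : Int) : List (Int × Int) → List Int
  | [] => []
  | p :: ps => (t + p.2) :: cums (t + p.2) ps

-- length of the equal-prefix and the remainder
def spanEq (v : Int) : List Int → Nat × List Int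
  | [] => (0, [])
  | x :: xs => if x = v then ((spanEq v xs).1 + 1, (spanEq v xs).2) else (0, x :: xs)

def tailRuns : List Int → List (Int × Int)
  | [] => []
  | y :: ys => runsAcc y 1 ys

theorem master (rest : List Int) : ∀ (c i m : Int),
    (stepA c (i - m) i rest).2.1 ++ [(i + (rest.length : Int)) - (stepA c (i - m) i rest).2.2.2.2]
        = (runsAcc c m rest).map Prod.snd
  ∧ (stepA c (i - m) i rest).2.2.1 ++ [(stepA c (i - m) i rest).2.2.2.1]
        = (runsAcc c m rest).map Prod.fst
  ∧ (stepA c (i - m) i rest).1 ++ [i + (rest.length : Int)] = cums (i - m) (runsAcc c m rest) := by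
  induction rest with
  | nil =>
    intro c i m
    refine ⟨?_, ?_, ?_⟩ <;> simp [stepA, runsAcc, cums]
  | cons x xs ih =>
    intro c i m
    by_cases h : x = c
    · subst h
      have hf : ¬ (x ≠ x) := fun hh => hh rfl
      have hs : i - m = (i + 1) - (m + 1) := by ring
      have hl : i + ((x :: xs).length : Int) = (i + 1) + (xs.length : Int) := by
        simp; ring
      simp only [stepA, if_neg hf, runsAcc, hl, hs]
      exact ih x (i + 1) (m + 1)
    · have ht : x ≠ c := h
      have hs : i = (i + 1) - 1 := by ring
      have hl : i + ((x :: xs).length : Int) = (i + 1) + (xs.length : Int) := by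
        simp; ring
      obtain ⟨h1, h2, h3⟩ := ih x (i + 1) 1
      rw [← hs] at h1 h2 h3
      simp only [stepA, if_pos ht, runsAcc, if_neg h, hl, List.cons_append, List.map_cons, cums]
      refine ⟨?_, ?_, ?_⟩
      · rw [h1]; congr 1; ring
      · rw [h2]
      · rw [show i - m + m = i by ring, h3]

theorem runsAcc_span (xs : List Int) : ∀ (c m : Int),
    runsAcc c m xs = (c, m + ((spanEq c xs).1 : Int)) :: tailRuns (spanEq c xs).2 := by
  induction xs with
  | nil => intro c m; simp [runsAcc, spanEq, tailRuns]
  | cons x xs ih =>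
    intro c m
    by_cases h : x = c
    · subst h
      rw [runsAcc, if_pos rfl, spanEq, if_pos rfl, ih x (m + 1)]
      congr 2
      push_cast; ring
    · rw [runsAcc, if_neg h, spanEq, if_neg h]
      simp [tailRuns]

theorem spanEq_drop (v : Int) (xs : List Int) :
    (spanEq v xs).2 = xs.drop (spanEq v xs).1 ∧ (spanEq v xs).1 ≤ xs.length := by
  induction xs with
  | nil => simp [spanEq]
  | cons x xs ih =>
    by_cases h : x = v
    · rw [spanEq, if_pos h]
      simpa using ih
    · rw [spanEq, if_neg h]
      simp

theorem getD_len (front : List Int) (y : Int) (tl : List Int) :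
    (front ++ y :: tl).getD front.length 0 = y := by
  simp [List.getD]

theorem pvAdvance_span (suffix : List Int) : ∀ (front : List Int) (v : Int),
    pvAdvance (front ++ suffix) v front.length = front.length + (spanEq v suffix).1 := by
  induction suffix with
  | nil =>
    intro front v
    rw [pvAdvance]
    simp [spanEq]
  | cons x xs ih =>
    intro front v
    rw [pvAdvance]
    by_cases h : x = v
    · subst h
      rw [dif_pos ⟨by simp, getD_len front x xs⟩]
      have := ih (front ++ [x]) x
      simp only [List.append_assoc, List.singleton_append, List.length_append,
        List.length_cons, List.length_nil] at this
      rw [show front.length + 1 = front.length + 0 + 1 by ring] at *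
      rw [this, spanEq, if_pos rfl]
      omega
    · rw [dif_neg (by rw [getD_len front x xs]; tauto), spanEq, if_neg h]
      simp

theorem pvRuns_eq (n : Nat) : ∀ (suffix front : List Int), suffix.length ≤ n →
    pvRuns (front ++ suffix) front.length = tailRuns suffix := by
  induction n with
  | zero =>
    intro suffix front h
    have : suffix = [] := List.eq_nil_of_length_eq_zero (by omega)
    subst this
    rw [pvRuns, dif_neg (by simp)]
    rfl
  | succ n ih =>
    intro suffix front h
    cases suffix with
    | nil =>
      rw [pvRuns, dif_neg (by simp)]
      rfl
    | cons x xs =>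
      rw [pvRuns, dif_pos (by simp)]
      obtain ⟨hdrop, hle⟩ := spanEq_drop x xs
      have hget : (front ++ x :: xs).getD front.length 0 = x := getD_len front x xs
      have hadv : pvAdvance (front ++ x :: xs) x (front.length + 1)
          = front.length + 1 + (spanEq x xs).1 := by
        have := pvAdvance_span xs (front ++ [x]) x
        simpa [List.append_assoc] using this
      set k := (spanEq x xs).1 with hk
      have hsplit : front ++ x :: xs = (front ++ x :: xs.take k) ++ (spanEq x xs).2 := by
        rw [hdrop]
        simp
      have hlen2 : (front ++ x :: xs.take k).length = front.length + 1 + k := by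
        simp [List.length_take]
        omega
      have hrec : pvRuns (front ++ x :: xs) (front.length + 1 + k) = tailRuns (spanEq x xs).2 := by
        rw [hsplit, ← hlen2]
        refine ih (spanEq x xs).2 (front ++ x :: xs.take k) ?_
        have h2 : (spanEq x xs).2.length = xs.length - k := by rw [hdrop]; simp
        have h3 : (x :: xs).length = xs.length + 1 := by simp
        omega
      simp only [hget, hadv, hrec]
      rw [show tailRuns (x :: xs) = runsAcc x 1 xs from rfl, runsAcc_span xs x 1]
      congr 2
      push_cast
      ring

theorem fold_cums (runs : List (Int × Int)) : ∀ (pre : List Int) (t : Int),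
    runs.foldl (fun b p => b ++ [b.getLastD 0 + p.2]) (pre ++ [t]) = pre ++ t :: cums t runs := by
  induction runs with
  | nil => intro pre t; simp [cums]
  | cons p ps ih =>
    intro pre t
    have hlast : (pre ++ [t]).getLastD 0 = t := by
      simp
    simp only [List.foldl_cons, hlast, cums]
    simpa using ih (pre ++ [t]) (t + p.2)

theorem find_label_boundaries_spec : Claim_equal_find_label_boundaries := by
  intro labels _ hpre
  unfold Spec_find_label_boundaries
  obtain ⟨c, rest, rfl⟩ : ∃ c rest, labels = c :: rest := by
    cases labels with
    | nil => exact absurd rfl hpre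
    | cons a l => exact ⟨a, l, rfl⟩
  have hruns : pvRuns (c :: rest) 0 = runsAcc c 1 rest := by
    have := pvRuns_eq (c :: rest).length (c :: rest) [] (le_refl _)
    simpa [tailRuns] using this
  obtain ⟨h1, h2, h3⟩ := master rest c 1 1
  norm_num at h1 h2 h3
  have hn : ((c :: rest).length : Int) = 1 + (rest.length : Int) := by
    simp; ring
  unfold find_label_boundaries find_label_boundaries_alt
  simp only [PySem.List.slice_from_one, List.tail_cons, PySem.List.pyGetD_zero_cons, hruns]
  rw [foldA_eq rest c 0 1 [0] [] []]
  have hfold := fold_cums (runsAcc c 1 rest) [] 0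
  simp only [List.nil_append] at hfold ⊢
  rw [hfold]
  refine Prod.ext ?_ (Prod.ext ?_ ?_)
  · show [0] ++ (stepA c 0 1 rest).1 ++ [((c :: rest).length : Int)] = 0 :: cums 0 (runsAcc c 1 rest)
    rw [hn, ← h3]
    simp
  · show (stepA c 0 1 rest).2.1 ++ [((c :: rest).length : Int) - (stepA c 0 1 rest).2.2.2.2]
        = (runsAcc c 1 rest).map (fun p => p.2)
    rw [hn, h1]
  · show (stepA c 0 1 rest).2.2.1 ++ [(stepA c 0 1 rest).2.2.2.1]
        = (runsAcc c 1 rest).map (fun p => p.1)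
    rw [h2]
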